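-- pv_equiv track=rewrite | github.com/hankcs/HanLP | hanlp/utils/span_util.py | bioul_tags_to_spans
-- ===== SOURCE A (Python) =====
-- from typing import Dict, List, Tuple, Callable, Set, Optional
--
-- TypedStringSpan = Tuple[str, Tuple[int, int]]
--
-- class InvalidTagSequence(Exception):
--     def __init__(self, tag_sequence=None):
--         super().__init__()
--         self.tag_sequence = tag_sequence
--
--     def __str__(self):
--         return " ".join(self.tag_sequence)
--
-- def bioul_tags_to_spans(
--         tag_sequence: List[str], classes_to_ignore: List[str] = None
-- ) -> List[TypedStringSpan]:
--     """
--     Given a sequence corresponding to BIOUL tags, extracts spans.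
--     Spans are inclusive and can be of zero length, representing a single word span.
--     Ill-formed spans are not allowed and will raise `InvalidTagSequence`.
--     This function works properly when the spans are unlabeled (i.e., your labels are
--     simply "B", "I", "O", "U", and "L").
--
--     # Parameters
--
--     tag_sequence : `List[str]`, required.
--         The tag sequence encoded in BIOUL, e.g. ["B-PER", "L-PER", "O"].
--     classes_to_ignore : `List[str]`, optional (default = `None`).
--         A list of string class labels `excluding` the bio tag
--         which should be ignored when extracting spans.
--
--     # Returns
--
--     spans : `List[TypedStringSpan]`
--         The typed, extracted spans from the sequence, in the format (label, (span_start, span_end)).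
--     """
--     spans = []
--     classes_to_ignore = classes_to_ignore or []
--     index = 0
--     while index < len(tag_sequence):
--         label = tag_sequence[index]
--         if label[0] == "U":
--             spans.append((label.partition("-")[2], (index, index)))
--         elif label[0] == "B":
--             start = index
--             while label[0] != "L":
--                 index += 1
--                 if index >= len(tag_sequence):
--                     raise InvalidTagSequence(tag_sequence)
--                 label = tag_sequence[index]
--                 if not (label[0] == "I" or label[0] == "L"):
--                     raise InvalidTagSequence(tag_sequence)
--             spans.append((label.partition("-")[2], (start, index)))
--         else:
--             if label != "O":
--                 raise InvalidTagSequence(tag_sequence)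
--         index += 1
--     return [span for span in spans if span[0] not in classes_to_ignore]
-- ===== SOURCE B (Python) =====
-- class InvalidTagSequence(Exception):
--     def __init__(self, tag_sequence=None):
--         super().__init__()
--         self.tag_sequence = tag_sequence
--
--     def __str__(self):
--         return " ".join(self.tag_sequence)
--
--
-- def bioul_tags_to_spans(tag_sequence, classes_to_ignore=None):
--     # Single flat pass: an explicit two-state machine (in_span, start) over
--     # enumerate(tag_sequence), instead of A's nested while loops with manual
--     # index arithmetic.
--     spans = []
--     in_span = False
--     start = 0
--     for i, label in enumerate(tag_sequence):
--         if in_span: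
--             if label[0] == "L":
--                 spans.append((label.partition("-")[2], (start, i)))
--                 in_span = False
--             elif label[0] != "I":
--                 raise InvalidTagSequence(tag_sequence)
--         else:
--             if label[0] == "U":
--                 spans.append((label.partition("-")[2], (i, i)))
--             elif label[0] == "B":
--                 in_span = True
--                 start = i
--             elif label != "O":
--                 raise InvalidTagSequence(tag_sequence)
--     if in_span:
--         raise InvalidTagSequence(tag_sequence)
--     ignore = classes_to_ignore or []
--     return [span for span in spans if span[0] not in ignore]
-- ===== Notes on version B (the rewrite author's own statement) =====
-- stated objective: idiomatic
-- what changed: Replaced A's nested while-loops with manual index mutation by a single flat for-loop over enumerate maintaining an explicit (in_span, start) state machine, with the end-of-sequence B/I error caught by a post-loop flag check.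
import Mathlib
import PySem

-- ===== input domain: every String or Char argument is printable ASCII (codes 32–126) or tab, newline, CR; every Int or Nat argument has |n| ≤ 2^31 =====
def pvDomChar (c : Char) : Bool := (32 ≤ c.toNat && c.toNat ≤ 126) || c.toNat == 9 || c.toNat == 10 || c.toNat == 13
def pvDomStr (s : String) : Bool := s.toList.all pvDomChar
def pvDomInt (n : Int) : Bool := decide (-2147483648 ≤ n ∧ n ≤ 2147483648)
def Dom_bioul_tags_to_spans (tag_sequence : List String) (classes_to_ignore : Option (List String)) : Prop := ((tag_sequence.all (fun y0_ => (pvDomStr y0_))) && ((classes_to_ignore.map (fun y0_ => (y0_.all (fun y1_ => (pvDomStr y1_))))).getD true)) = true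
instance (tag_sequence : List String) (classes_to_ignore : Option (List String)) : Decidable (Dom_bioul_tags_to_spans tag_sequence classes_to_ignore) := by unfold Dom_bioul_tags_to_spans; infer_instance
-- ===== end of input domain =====

-- B rewrites A's nested while-loops as one flat pass with an explicit (in_span, start) state machine; objective: idiomatic (same O(n) cost).

-- ===== PORT A =====
-- label[0] as Python sees it: none = IndexError on ""
def pvFirst (s : String) : Option Char := s.toList.head?
-- label.partition("-")[2]
def pvTagType (s : String) : String :=
  match s.toList.dropWhile (· ≠ '-') with
  | [] => ""
  | _ :: rest => String.ofList rest

-- A's inner 'while label[0] != "L"' loop: returns (index of the L tag, that tag), none = raise.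
-- fuel is only a structural bound on the remaining steps (the loop advances index each turn,
-- so fuel = tags.length never runs out); the 0-guard is unreachable from the entry call.
def aInner (tags : List String) : Nat → Nat → String → Option (Nat × String)
  | fuel, index, label =>
    if pvFirst label = some 'L' then some (index, label)
    else
      match fuel with
      | 0 => none
      | fuel + 1 =>
        if h : index + 1 < tags.length then
          if pvFirst tags[index + 1] = some 'I' ∨ pvFirst tags[index + 1] = some 'L' then
            aInner tags fuel (index + 1) tags[index + 1]
          else none
        else none

-- A's outer 'while index < len(tag_sequence)' loop; none = raise; same structural fuel bound
def aOuter (tags : List String) : Nat → Nat → List (String × (Int × Int)) → Option (List (String × (Int × Int)))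
  | fuel, index, spans =>
    if h : index < tags.length then
      match fuel with
      | 0 => none
      | fuel + 1 =>
        if pvFirst tags[index] = some 'U' then
          aOuter tags fuel (index + 1) (spans ++ [(pvTagType tags[index], ((index : Int), (index : Int)))])
        else if pvFirst tags[index] = some 'B' then
          match aInner tags tags.length index tags[index] with
          | some (j, l) => aOuter tags fuel (j + 1) (spans ++ [(pvTagType l, ((index : Int), (j : Int)))])
          | none => none
        else if tags[index] = "O" then
          aOuter tags fuel (index + 1) spans
        else none
    else some spans

-- on inputs where the Python raises, the port returns [] (excluded by Pre_)
def bioul_tags_to_spans (tag_sequence : List String) (classes_to_ignore : Option (List String)) :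
    List (String × (Int × Int)) :=
  match aOuter tag_sequence tag_sequence.length 0 [] with
  | some spans => spans.filter (fun sp => !((classes_to_ignore.getD []).contains sp.1))
  | none => []

-- ===== PORT B =====
-- B's single for-loop over enumerate with state (spans, in_span, start); none = raise
def bLoop (items : List (Int × String)) (spans : List (String × (Int × Int)))
    (in_span : Bool) (start : Int) : Option (List (String × (Int × Int)) × Bool) :=
  match items with
  | [] => some (spans, in_span)
  | (i, label) :: rest =>
    if in_span then
      if pvFirst label = some 'L' then
        bLoop rest (spans ++ [(pvTagType label, (start, i))]) false start
      else if pvFirst label = some 'I' then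
        bLoop rest spans true start
      else none
    else
      if pvFirst label = some 'U' then
        bLoop rest (spans ++ [(pvTagType label, (i, i))]) in_span start
      else if pvFirst label = some 'B' then
        bLoop rest spans true i
      else if label = "O" then
        bLoop rest spans in_span start
      else none

def bioul_tags_to_spans_alt (tag_sequence : List String) (classes_to_ignore : Option (List String)) :
    List (String × (Int × Int)) :=
  match bLoop (PySem.List.enumerate tag_sequence 0) [] false 0 with
  | some (spans, false) => spans.filter (fun sp => !((classes_to_ignore.getD []).contains sp.1))
  | _ => []  -- the loop hit a bad tag, or in_span survived the loop: Python raises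

-- ===== PRECONDITION & SPEC =====
-- the tag is one an out-of-span position accepts
def pvOutOk (s : String) : Bool := pvFirst s == some 'U' || pvFirst s == some 'B' || s == "O"
-- after this tag the machine is inside a span
def pvInTag (s : String) : Bool := pvFirst s == some 'B' || pvFirst s == some 'I'
-- the tag is one an in-span position accepts
def pvInOk (s : String) : Bool := pvFirst s == some 'I' || pvFirst s == some 'L'

-- Pre_ = exactly the well-formed BIOUL sequences: on every other tag sequence the Python A
-- raises (InvalidTagSequence, or IndexError from label[0] on a zero-length tag) and both ports return a dummy value.
def Pre_bioul_tags_to_spans (tag_sequence : List String) (classes_to_ignore : Option (List String)) : Prop :=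
  tag_sequence.head?.all pvOutOk = true ∧
  (tag_sequence.zip tag_sequence.tail).all (fun p => cond (pvInTag p.1) (pvInOk p.2) (pvOutOk p.2)) = true ∧
  tag_sequence.getLast?.all (fun s => !pvInTag s) = true

instance (tag_sequence : List String) (classes_to_ignore : Option (List String)) :
    Decidable (Pre_bioul_tags_to_spans tag_sequence classes_to_ignore) := by
  unfold Pre_bioul_tags_to_spans
  infer_instance

def pvWitness_bioul_tags_to_spans : List String × Option (List String) :=
  (["B-PER", "I-PER", "L-PER", "O", "U-LOC"], some ["PER"])

def Spec_bioul_tags_to_spans (tag_sequence : List String) (classes_to_ignore : Option (List String)) (out : List (String × (Int × Int))) : Prop := out = bioul_tags_to_spans_alt tag_sequence classes_to_ignore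
instance (tag_sequence : List String) (classes_to_ignore : Option (List String)) (out : List (String × (Int × Int))) : Decidable (Spec_bioul_tags_to_spans tag_sequence classes_to_ignore out) := by unfold Spec_bioul_tags_to_spans; infer_instance

-- ===== CLAIM (what is proved, stated in full; the proofs are below) =====
def Claim_equal_bioul_tags_to_spans : Prop := ∀ (tag_sequence : List String) (classes_to_ignore : Option (List String)), Dom_bioul_tags_to_spans tag_sequence classes_to_ignore → Pre_bioul_tags_to_spans tag_sequence classes_to_ignore → Spec_bioul_tags_to_spans tag_sequence classes_to_ignore (bioul_tags_to_spans tag_sequence classes_to_ignore)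

-- ===== LEMMAS AND PROOFS =====

-- aInner only moves forward
theorem aInner_le (tags : List String) (fuel k : Nat) (label : String) (j : Nat) (l : String)
    (h : aInner tags fuel k label = some (j, l)) : k ≤ j := by
  fun_induction aInner tags fuel k label
  all_goals simp_all
  all_goals omega

-- A's inner loop found the L at j: B's machine, in-span from k+1, closes the same span at j
theorem bLoop_of_aInner_some (tags : List String) (fuel k : Nat) (label : String) (j : Nat) (l : String)
    (hfuel : tags.length ≤ fuel + k + 1)
    (hL : pvFirst label ≠ some 'L') (h : aInner tags fuel k label = some (j, l)) (spans : List (String × (Int × Int))) (start : Int) :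
    bLoop (PySem.List.enumerate (tags.drop (k + 1)) ((k : Int) + 1)) spans true start =
      bLoop (PySem.List.enumerate (tags.drop (j + 1)) ((j : Int) + 1))
        (spans ++ [(pvTagType l, (start, (j : Int)))]) false start := by
  fun_induction aInner tags fuel k label with
  | case1 fuel idx lab hLab =>
      exact absurd hLab hL
  | case2 idx lab hLab =>
      simp at h
  | case3 idx lab hLab fuel hlt hin ih =>
      rw [List.drop_eq_getElem_cons hlt, PySem.List.enumerate_cons]
      by_cases hL' : pvFirst tags[idx + 1] = some 'L'
      · have hrec : aInner tags fuel (idx + 1) tags[idx + 1] = some (idx + 1, tags[idx + 1]) := by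
          rw [aInner.eq_def]; simp [hL']
        rw [hrec] at h
        simp only [Option.some.injEq, Prod.mk.injEq] at h
        obtain ⟨rfl, rfl⟩ := h
        simp only [bLoop, hL', if_pos]
        push_cast
        ring_nf
      · have hI : pvFirst tags[idx + 1] = some 'I' := hin.resolve_right hL'
        have ihh := ih (by omega) hL' h
        push_cast at ihh
        simp only [bLoop, hI, if_pos]
        exact ihh
  | case4 idx lab hLab fuel hlt hnin =>
      simp at h
  | case5 idx lab hLab fuel hge =>
      simp at h

-- A's inner loop raised: B's machine from k+1 in-span never returns a closed (·, false) state
theorem bLoop_of_aInner_none (tags : List String) (fuel k : Nat) (label : String)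
    (hfuel : tags.length ≤ fuel + k + 1)
    (hL : pvFirst label ≠ some 'L') (h : aInner tags fuel k label = none) (spans : List (String × (Int × Int))) (start : Int) (S : List (String × (Int × Int))) :
    bLoop (PySem.List.enumerate (tags.drop (k + 1)) ((k : Int) + 1)) spans true start ≠ some (S, false) := by
  fun_induction aInner tags fuel k label with
  | case1 fuel idx lab hLab =>
      exact absurd hLab hL
  | case2 idx lab hLab =>
      rw [List.drop_eq_nil_of_le (by omega)]
      simp [PySem.List.enumerate_nil, bLoop]
  | case3 idx lab hLab fuel hlt hin ih =>
      rw [List.drop_eq_getElem_cons hlt, PySem.List.enumerate_cons]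
      by_cases hL' : pvFirst tags[idx + 1] = some 'L'
      · rw [aInner.eq_def] at h; simp [hL'] at h
      · have hI : pvFirst tags[idx + 1] = some 'I' := hin.resolve_right hL'
        have ihh := ih (by omega) hL' h
        push_cast at ihh
        simp only [bLoop, hI, if_pos]
        exact ihh
  | case4 idx lab hLab fuel hlt hnin =>
      simp only [not_or] at hnin
      rw [List.drop_eq_getElem_cons hlt, PySem.List.enumerate_cons]
      simp [bLoop, hnin.1, hnin.2]
  | case5 idx lab hLab fuel hge =>
      rw [List.drop_eq_nil_of_le (by omega)]
      simp [PySem.List.enumerate_nil, bLoop]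

-- main correspondence: A's outer loop from index = B's machine on the enumerated suffix
theorem aOuter_eq_bLoop (tags : List String) (fuel index : Nat) (spans : List (String × (Int × Int))) (start : Int)
    (hfuel : tags.length ≤ fuel + index) :
    aOuter tags fuel index spans =
      (match bLoop (PySem.List.enumerate (tags.drop index) (index : Int)) spans false start with
       | some (S, false) => some S
       | _ => none) := by
  revert hfuel start
  fun_induction aOuter tags fuel index spans with
  | case1 idx spans hlt =>
      intro start hfuel
      omega
  | case2 idx spans hlt fuel hU ih =>
      intro start hfuel
      rw [ih start (by omega)]
      rw [List.drop_eq_getElem_cons hlt, PySem.List.enumerate_cons]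
      simp only [bLoop, hU, if_pos]
      push_cast
      ring_nf
  | case3 idx spans hlt fuel hU hB j l hin ih =>
      intro start hfuel
      have hj := aInner_le tags tags.length idx tags[idx] j l hin
      rw [ih ((idx : Int)) (by omega)]
      rw [List.drop_eq_getElem_cons hlt, PySem.List.enumerate_cons]
      have hL : pvFirst tags[idx] ≠ some 'L' := by simp [hB]
      have hstep := bLoop_of_aInner_some tags tags.length idx tags[idx] j l (by omega) hL hin spans ((idx : Int))
      push_cast at hstep
      simp [bLoop, hB, hstep]
  | case4 idx spans hlt fuel hU hB hin =>
      intro start hfuel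
      rw [List.drop_eq_getElem_cons hlt, PySem.List.enumerate_cons]
      have hL : pvFirst tags[idx] ≠ some 'L' := by simp [hB]
      simp only [bLoop, hB, if_pos]
      rcases hb : bLoop (PySem.List.enumerate (tags.drop (idx + 1)) ((idx : Int) + 1)) spans true ((idx : Int)) with _ | ⟨S, b⟩
      · rfl
      · cases b
        · exact absurd hb (bLoop_of_aInner_none tags tags.length idx tags[idx] (by omega) hL hin spans ((idx : Int)) S)
        · rfl
  | case5 idx spans hlt fuel hU hB hO ih =>
      intro start hfuel
      rw [ih start (by omega)]
      rw [List.drop_eq_getElem_cons hlt, PySem.List.enumerate_cons]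
      rw [bLoop]
      rw [if_neg (by simp), if_neg (by simp [hU]), if_neg (by simp [hB]), if_pos (by simp [hO])]
      push_cast
      rfl
  | case6 idx spans hlt fuel hU hB hO =>
      intro start hfuel
      rw [List.drop_eq_getElem_cons hlt, PySem.List.enumerate_cons]
      simp [bLoop, hU, hB, hO]
  | case7 fuel idx spans hge =>
      intro start hfuel
      rw [List.drop_eq_nil_of_le (by omega)]
      simp [PySem.List.enumerate_nil, bLoop]

-- ===== VERDICT (by name: the statement is the Claim_ definition above) =====
theorem bioul_tags_to_spans_spec : Claim_equal_bioul_tags_to_spans := by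
  intro tags cl _ _
  unfold Spec_bioul_tags_to_spans bioul_tags_to_spans bioul_tags_to_spans_alt
  have h := aOuter_eq_bLoop tags tags.length 0 [] 0 (by omega)
  simp only [List.drop_zero, Int.natCast_zero] at h
  rw [h]
  rcases hb : bLoop (PySem.List.enumerate tags 0) [] false 0 with _ | ⟨S, b⟩
  · simp
  · cases b <;> simp
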